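-- pv_equiv track=rewrite | github.com/aokirae/mobaPquestionnaire | src/NotationRepair.py | compareFirstLastName
-- ===== SOURCE A (Python) =====
-- def compareFirstLastName(names, idolname):
-- 	for i in range(len(names)):
-- 		for j in range(len(names[i])):
-- 			splits = names[i][j].split(' ')
-- 			splits = [x for x in splits if x != '']
-- 			if len(splits) == 1:
-- 				names[i][j] = splits[0]
-- 			if len(splits) != 2:
-- 				continue
-- 			candidate_firstname = []
-- 			candidate_lastname = []
-- 			for ii in idolname:
-- 				if ii.find(splits[0]) != -1:
-- 					candidate_firstname.append(ii)
-- 				if ii.find(splits[1]) != -1: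
-- 					candidate_lastname.append(ii)
-- 			for icf in candidate_firstname:
-- 				for icl in candidate_lastname:
-- 					if icf == icl:
-- 						names[i][j] = icf
--
-- 	return names
-- ===== SOURCE B (Python) =====
-- def compareFirstLastName(names, idolname):
--     def fix(cell):
--         toks = [t for t in cell.split(' ') if t != '']
--         if len(toks) == 1:
--             return toks[0]
--         if len(toks) != 2:
--             return cell
--         first, last = toks
--         for cand in reversed(idolname):
--             if first in cand and last in cand:
--                 return cand
--         return cell
--     return [[fix(cell) for cell in row] for row in names]
-- ===== Notes on version B (the rewrite author's own statement) =====
-- stated objective: alternative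
-- what changed: Per two-token cell, A builds two candidate lists over idolname and then compares every first-name candidate against every last-name candidate to keep the last common one; B instead does one reversed scan of idolname returning the first entry containing both tokens, and builds a new nested list instead of mutating names in place (same return value).
import Mathlib
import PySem

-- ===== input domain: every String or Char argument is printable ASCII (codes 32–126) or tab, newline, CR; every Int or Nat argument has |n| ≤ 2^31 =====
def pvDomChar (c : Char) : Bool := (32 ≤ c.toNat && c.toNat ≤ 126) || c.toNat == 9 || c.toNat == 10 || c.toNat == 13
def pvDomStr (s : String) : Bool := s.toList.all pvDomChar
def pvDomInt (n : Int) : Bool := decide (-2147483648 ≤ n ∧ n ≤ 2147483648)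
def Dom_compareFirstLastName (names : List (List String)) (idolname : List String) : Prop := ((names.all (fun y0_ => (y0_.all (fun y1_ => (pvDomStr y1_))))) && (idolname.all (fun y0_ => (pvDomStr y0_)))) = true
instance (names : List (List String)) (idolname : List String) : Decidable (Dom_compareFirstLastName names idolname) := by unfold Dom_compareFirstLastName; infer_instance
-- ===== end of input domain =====

-- B replaces A's per-cell candidate-list building plus quadratic candidate comparison by a single
-- reversed scan of idolname returning the first (= last in order) entry containing both tokens.
-- A mutates `names` in place and returns it; B builds a new list — the equivalence proved here is
-- about the RETURN value only.

-- ===== PORT A =====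
-- per-cell body of A's two inner statements (split, the two ifs, candidate lists, nested compare);
-- the final value of names[i][j] after the loop body ran on it
def pvACell (idolname : List String) (s : String) : String :=
  let splits := ((PySem.Str.split? s " ").getD []).filter (fun x => x ≠ "")  -- sep " " ≠ "", so split? is some
  let cur := if splits.length = 1 then PySem.List.pyGetD splits 0 s else s
  if splits.length ≠ 2 then cur
  else
    let cand := idolname.foldl
      (fun (p : List String × List String) ii =>
        (if PySem.Str.find ii (PySem.List.pyGetD splits 0 "") ≠ -1 then p.1 ++ [ii] else p.1,
         if PySem.Str.find ii (PySem.List.pyGetD splits 1 "") ≠ -1 then p.2 ++ [ii] else p.2))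
      ([], [])
    cand.1.foldl (fun acc icf => cand.2.foldl (fun a2 icl => if icf = icl then icf else a2) acc) cur

def compareFirstLastName (names : List (List String)) (idolname : List String) : List (List String) :=
  -- for i in range(len(names)): for j in range(len(names[i])): names[i][j] = <loop body value>
  -- (indices from range are always in range, so the pyGetD/pySetD defaults are never used)
  (PySem.List.pyRange 0 (PySem.List.len names) 1).foldl
    (fun ns i => PySem.List.pySetD ns i
      ((PySem.List.pyRange 0 (PySem.List.len (PySem.List.pyGetD ns i [])) 1).foldl
        (fun r j => PySem.List.pySetD r j (pvACell idolname (PySem.List.pyGetD r j "")))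
        (PySem.List.pyGetD ns i [])))
    names

-- ===== PORT B =====
def pvBCell (idolname : List String) (cell : String) : String :=
  match ((PySem.Str.split? cell " ").getD []).filter (fun t => t ≠ "") with
  | [t] => t
  | [first, last] =>
    match idolname.reverse.find? (fun cand => PySem.Str.isIn first cand && PySem.Str.isIn last cand) with
    | some cand => cand
    | none => cell
  | _ => cell

def compareFirstLastName_alt (names : List (List String)) (idolname : List String) : List (List String) :=
  names.map (fun row => row.map (pvBCell idolname))

-- ===== PRECONDITION & SPEC =====
def Spec_compareFirstLastName (names : List (List String)) (idolname : List String) (out : List (List String)) : Prop := out = compareFirstLastName_alt names idolname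
instance (names : List (List String)) (idolname : List String) (out : List (List String)) : Decidable (Spec_compareFirstLastName names idolname out) := by unfold Spec_compareFirstLastName; infer_instance

-- ===== CLAIM (what is proved, stated in full; the proofs are below) =====
def Claim_equal_compareFirstLastName : Prop := ∀ (names : List (List String)) (idolname : List String), Dom_compareFirstLastName names idolname → Spec_compareFirstLastName names idolname (compareFirstLastName names idolname)

-- ===== LEMMAS AND PROOFS =====

-- find? over a filtered list is find? with the conjoined predicate
lemma pv_find?_filter {α : Type} (l : List α) (p q : α → Bool) :
    (l.filter q).find? p = l.find? (fun x => q x && p x) := by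
  induction l with
  | nil => rfl
  | cons x t ih =>
    by_cases h : q x = true
    · cases hp : p x <;> simp [h, hp, ih]
    · simp [h, ih]

-- A's inner loop 'for icl in cl: if icf == icl: acc = icf' is a membership test
lemma pv_foldl_memPick {α : Type} [DecidableEq α] (l : List α) (v a : α) :
    l.foldl (fun a2 x => if v = x then v else a2) a = if v ∈ l then v else a := by
  induction l generalizing a with
  | nil => simp
  | cons x t ih =>
    simp only [List.foldl_cons]
    rw [ih]
    by_cases h : v = x <;> simp [h]

-- the index loop 'for j in range(len(xs)): xs[j] = f(xs[j])' maps f over the untouched suffix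
lemma pv_setmap {α : Type} (f : α → α) (d : α) :
    ∀ (suf pre : List α),
      (PySem.List.pyRange (pre.length : Int) ((pre.length : Int) + (suf.length : Int)) 1).foldl
        (fun r j => PySem.List.pySetD r j (f (PySem.List.pyGetD r j d))) (pre ++ suf)
      = pre ++ suf.map f := by
  intro suf
  induction suf with
  | nil =>
    intro pre
    simp only [List.length_nil, Nat.cast_zero, add_zero]
    rw [PySem.List.pyRange_one_eq_nil (le_refl _)]
    simp
  | cons x t ih =>
    intro pre
    rw [PySem.List.pyRange_one_cons (by simp only [List.length_cons]; push_cast; omega),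
      List.foldl_cons]
    have hget : PySem.List.pyGetD (pre ++ x :: t) (pre.length : Int) d = x := by
      simp [List.getD_eq_getElem?_getD]
    have hset : PySem.List.pySetD (pre ++ x :: t) (pre.length : Int) (f x) = (pre ++ [f x]) ++ t := by
      simp
    rw [hget, hset]
    have h1 : (pre.length : Int) + 1 = ((pre ++ [f x]).length : Int) := by
      simp only [List.length_append, List.length_cons, List.length_nil]; push_cast; omega
    have h2 : (pre.length : Int) + ((x :: t).length : Int)
        = ((pre ++ [f x]).length : Int) + (t.length : Int) := by
      simp only [List.length_append, List.length_cons, List.length_nil]; push_cast; omega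
    rw [h1, h2, ih (pre ++ [f x])]
    simp

lemma pv_mapAll {α : Type} (f : α → α) (d : α) (xs : List α) :
    (PySem.List.pyRange 0 (PySem.List.len xs) 1).foldl
      (fun r j => PySem.List.pySetD r j (f (PySem.List.pyGetD r j d))) xs
    = xs.map f := by
  have := pv_setmap f d xs []
  simpa using this

-- find? respects pointwise-equal predicates on the list's members
lemma pv_find?_congr {α : Type} (l : List α) (p q : α → Bool) (h : ∀ x ∈ l, p x = q x) :
    l.find? p = l.find? q := by
  induction l with
  | nil => rfl
  | cons x t ih =>
    have hx := h x (List.mem_cons_self)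
    cases hp : p x <;>
      simp [hp, ← hx, ih (fun y hy => h y (List.mem_cons_of_mem x hy))]

-- A's nested candidate loops keep the last element of cf that lies in cl
lemma pv_nested {α : Type} [DecidableEq α] (cf cl : List α) (s : α) :
    cf.foldl (fun acc icf => cl.foldl (fun a2 icl => if icf = icl then icf else a2) acc) s
    = (cf.reverse.find? (fun x => decide (x ∈ cl))).getD s := by
  induction cf using List.reverseRecOn generalizing s with
  | nil => rfl
  | append_singleton t x ih =>
    rw [List.foldl_append, List.foldl_cons, List.foldl_nil, pv_foldl_memPick]
    by_cases h : x ∈ cl <;> simp [h, ih]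

-- A's two-token else-branch: candidate lists + quadratic compare = last idolname entry
-- containing both tokens
lemma pv_twoTok (idolname : List String) (s a b : String) :
    (List.foldl
        (fun (p : List String × List String) ii =>
          (if PySem.Str.find ii a ≠ -1 then p.1 ++ [ii] else p.1,
           if PySem.Str.find ii b ≠ -1 then p.2 ++ [ii] else p.2))
        ([], []) idolname).1.foldl
      (fun acc icf =>
        (List.foldl
            (fun (p : List String × List String) ii =>
              (if PySem.Str.find ii a ≠ -1 then p.1 ++ [ii] else p.1,
               if PySem.Str.find ii b ≠ -1 then p.2 ++ [ii] else p.2))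
            ([], []) idolname).2.foldl (fun a2 icl => if icf = icl then icf else a2) acc)
      s
    = (idolname.reverse.find?
        (fun cand => PySem.Str.isIn a cand && PySem.Str.isIn b cand)).getD s := by
  rw [PySem.List.foldl_prod_mk
    (f := fun (p : List String) (ii : String) => if PySem.Str.find ii a ≠ -1 then p ++ [ii] else p)
    (g := fun (p : List String) (ii : String) => if PySem.Str.find ii b ≠ -1 then p ++ [ii] else p)]
  have flip : ∀ (t : String) (p : List String) (ii : String),
      (if PySem.Str.find ii t ≠ -1 then p ++ [ii] else p) =
      (if PySem.Str.isIn t ii then p ++ [ii] else p) := by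
    intro t p ii
    by_cases h : t.toList <:+: ii.toList
    · rw [if_pos ((PySem.Str.find_ne_neg_one_iff _ _).mpr h),
        if_pos ((PySem.Str.isIn_iff_infix _ _).mpr h)]
    · rw [if_neg (fun hc => h ((PySem.Str.find_ne_neg_one_iff _ _).mp hc)),
        if_neg (fun hc => h ((PySem.Str.isIn_iff_infix _ _).mp hc))]
  simp only [flip]
  rw [PySem.List.foldl_append_if_eq_filter, PySem.List.foldl_append_if_eq_filter]
  simp only [List.nil_append]
  rw [pv_nested, ← List.filter_reverse, pv_find?_filter]
  refine congrArg (fun o => Option.getD o s) (pv_find?_congr _ _ _ ?_)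
  intro x hx
  by_cases h : PySem.Str.isIn b x = true
  · simp [List.mem_filter, List.mem_reverse.mp hx]
  · simp [List.mem_filter, List.mem_reverse.mp hx]

-- the two per-cell computations agree
lemma pv_cell (idolname : List String) (s : String) : pvACell idolname s = pvBCell idolname s := by
  unfold pvACell pvBCell
  rcases hts : ((PySem.Str.split? s " ").getD []).filter (fun x => x ≠ "") with _ | ⟨a, _ | ⟨b, _ | ⟨c, rest⟩⟩⟩
  · simp
  · simp [PySem.List.pyGetD_zero_cons]
  · -- the two-token case
    have hg0 : PySem.List.pyGetD [a, b] (0 : Int) "" = a := rfl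
    have hg1 : PySem.List.pyGetD [a, b] (1 : Int) "" = b := rfl
    simp only [hg0, hg1]
    rw [if_neg (show ¬ (([a, b] : List String).length ≠ 2) by simp),
      if_neg (show ¬ (([a, b] : List String).length = 1) by simp)]
    rw [pv_twoTok idolname s a b]
    rcases hf : idolname.reverse.find? (fun cand => PySem.Str.isIn a cand && PySem.Str.isIn b cand)
      with _ | v <;> simp
  · simp

-- ===== VERDICT (by name: the statement is the Claim_ definition above) =====
theorem compareFirstLastName_spec : Claim_equal_compareFirstLastName := by
  intro names idolname _
  unfold Spec_compareFirstLastName compareFirstLastName compareFirstLastName_alt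
  rw [pv_mapAll (fun row =>
        (PySem.List.pyRange 0 (PySem.List.len row) 1).foldl
          (fun r j => PySem.List.pySetD r j (pvACell idolname (PySem.List.pyGetD r j ""))) row)
      ([] : List String) names]
  refine List.map_congr_left (fun row _ => ?_)
  rw [pv_mapAll (pvACell idolname) "" row]
  exact List.map_congr_left (fun s _ => pv_cell idolname s)
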